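-- pv_equiv track=rewrite | github.com/QuangPhung15/CompetitiveProgramming | CSES/Introductory Problems/Palindrome Reorder.py | solve
-- ===== SOURCE A (Python) =====
-- import collections
--
-- def solve(s):
-- 	res = ""
-- 	count = collections.defaultdict(int)
-- 	odd = ""
--
-- 	for c in s:
-- 		count[c] += 1
--
-- 	for k, v in count.items():
-- 		if (v % 2 == 0):
-- 			res += k * (v // 2)
-- 		else:
-- 			if (odd != ""):
-- 				return "NO SOLUTION"
--
-- 			odd = k
-- 			res += k * ((v - 1) // 2)
--
-- 	return res + odd + res[::-1]
-- ===== SOURCE B (Python) =====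
-- def solve(s):
--     halves = []
--     odds = []
--     rest = s
--     while rest:
--         c = rest[0]
--         n = rest.count(c)
--         rest = rest.replace(c, "")
--         halves.append(c * (n // 2))
--         if n % 2:
--             odds.append(c)
--     if len(odds) > 1:
--         return "NO SOLUTION"
--     half = "".join(halves)
--     return half + "".join(odds) + half[::-1]
-- ===== Notes on version B (the rewrite author's own statement) =====
-- stated objective: alternative
-- what changed: B drops the counting dict entirely: it repeatedly takes the first remaining character, counts its occurrences with str.count and strikes them all out with str.replace, collecting half-chunks and odd characters, then checks feasibility once at the end; A builds a defaultdict of counts and fuses the odd-check into the construction loop with an early return.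
import Mathlib
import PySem

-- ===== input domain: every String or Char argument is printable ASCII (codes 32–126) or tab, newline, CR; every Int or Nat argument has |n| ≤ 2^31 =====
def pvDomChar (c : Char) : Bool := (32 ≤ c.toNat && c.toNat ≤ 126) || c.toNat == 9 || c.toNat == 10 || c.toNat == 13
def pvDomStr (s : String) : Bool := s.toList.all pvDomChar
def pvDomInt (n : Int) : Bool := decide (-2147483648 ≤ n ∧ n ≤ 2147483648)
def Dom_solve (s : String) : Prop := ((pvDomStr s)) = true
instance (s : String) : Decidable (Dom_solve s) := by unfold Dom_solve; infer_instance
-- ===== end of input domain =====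

-- B replaces A's counting dict entirely: it repeatedly takes the first remaining character,
-- counts and strikes out all its occurrences from the string, then checks feasibility once
-- at the end (same return value; 'alternative' decomposition, no Counter/dict at all).

-- ===== PORT A =====
-- A's second loop, with early return "NO SOLUTION": state is (res, odd) as char lists
def solveLoopA : List (Char × Int) → List Char → List Char → String
  | [], res, odd => String.mk (res ++ odd ++ res.reverse)
  | (k, v) :: rest, res, odd =>
    if PySem.Int.mod v 2 = 0 then
      solveLoopA rest (res ++ List.replicate (PySem.Int.floordiv v 2).toNat k) odd
    else if odd ≠ [] then "NO SOLUTION"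
    else solveLoopA rest (res ++ List.replicate (PySem.Int.floordiv (v - 1) 2).toNat k) [k]

def solve (s : String) : String :=
  let count : PySem.Dict Char Int :=
    s.toList.foldl (fun d c => d.modify c 0 (· + 1)) PySem.Dict.empty
  solveLoopA count.items [] []

-- ===== PORT B =====
-- B's while loop: rest is the remaining characters; each step takes c = rest[0],
-- n = rest.count(c) and removes all c from rest (str.replace(c, "") on a 1-char
-- pattern = filter; str.count of a single char = list count — exact on this domain).
def solveLoopB : List Char → List (List Char) → List Char → (List (List Char) × List Char)
  | [], halves, odds => (halves, odds)
  | c :: t, halves, odds =>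
    let n : Int := ((c :: t).count c : Int)
    let halves' := halves ++ [List.replicate (PySem.Int.floordiv n 2).toNat c]
    let odds' := if PySem.Int.mod n 2 ≠ 0 then odds ++ [c] else odds
    solveLoopB (t.filter (fun x => x ≠ c)) halves' odds'
termination_by l => l.length
decreasing_by
  have h := List.length_filter_le (fun x : {x // x ∈ t} => !decide (↑x = c)) t.attach
  simp at h ⊢; omega

def solve_alt (s : String) : String :=
  let p := solveLoopB s.toList [] []
  if 1 < p.2.length then "NO SOLUTION"
  else String.mk (p.1.flatten ++ p.2 ++ p.1.flatten.reverse)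

-- ===== PRECONDITION & SPEC =====
def Spec_solve (s : String) (out : String) : Prop := out = solve_alt s
instance (s : String) (out : String) : Decidable (Spec_solve s out) := by unfold Spec_solve; infer_instance

-- ===== CLAIM (what is proved, stated in full; the proofs are below) =====
def Claim_equal_solve : Prop := ∀ (s : String), Dom_solve s → Spec_solve s (solve s)

-- ===== LEMMAS AND PROOFS =====

-- the counts dict's items, as a pure function of the input list
def itemsSpec (l : List Char) : List (Char × Int) :=
  (PySem.Set.ofList l).map (fun k => (k, (l.count k : Int)))

def oddsOf (l : List (Char × Int)) : List Char :=
  (l.filter (fun kv => PySem.Int.mod kv.2 2 ≠ 0)).map (·.1)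

def halvesOf (l : List (Char × Int)) : List (List Char) :=
  l.map (fun kv => List.replicate (PySem.Int.floordiv kv.2 2).toNat kv.1)

lemma floordiv_pred_of_odd (v : Int) (h : PySem.Int.mod v 2 ≠ 0) :
    PySem.Int.floordiv (v - 1) 2 = PySem.Int.floordiv v 2 := by
  rw [PySem.Int.floordiv_eq_ediv_of_pos (by omega), PySem.Int.floordiv_eq_ediv_of_pos (by omega)]
  rw [PySem.Int.mod_eq_emod_of_pos (by omega)] at h
  omega

lemma oddsOf_cons (kv : Char × Int) (rest : List (Char × Int)) :
    oddsOf (kv :: rest)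
      = (if PySem.Int.mod kv.2 2 ≠ 0 then [kv.1] else []) ++ oddsOf rest := by
  by_cases hv : PySem.Int.mod kv.2 2 = 0
  · have hv' : ¬ (kv.2 % 2 = 1) := by
      rw [PySem.Int.mod_eq_emod_of_pos (by norm_num)] at hv; omega
    simp [oddsOf, hv']
  · have hv' : kv.2 % 2 = 1 := by
      rw [PySem.Int.mod_eq_emod_of_pos (by norm_num)] at hv; omega
    simp [oddsOf, hv']

-- A's loop, both odd-states, characterised against the odds/halves decomposition
lemma loopA_char (l : List (Char × Int)) (res : List Char) :
    (solveLoopA l res [] =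
      if 2 ≤ (oddsOf l).length then "NO SOLUTION"
      else String.mk ((res ++ (halvesOf l).flatten) ++
        (match oddsOf l with | [] => [] | c :: _ => [c]) ++ (res ++ (halvesOf l).flatten).reverse)) ∧
    (∀ c : Char, solveLoopA l res [c] =
      if 1 ≤ (oddsOf l).length then "NO SOLUTION"
      else String.mk ((res ++ (halvesOf l).flatten) ++ [c] ++ (res ++ (halvesOf l).flatten).reverse)) := by
  induction l generalizing res with
  | nil =>
    constructor
    · simp [solveLoopA, oddsOf, halvesOf]
    · intro c; simp [solveLoopA, oddsOf, halvesOf]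
  | cons kv rest ih =>
    obtain ⟨k, v⟩ := kv
    have hh : (halvesOf ((k, v) :: rest)).flatten
        = List.replicate (PySem.Int.floordiv v 2).toNat k ++ (halvesOf rest).flatten := by
      simp [halvesOf]
    by_cases hv : PySem.Int.mod v 2 = 0
    · have hv' : ¬ (v % 2 = 1) := by
        rw [PySem.Int.mod_eq_emod_of_pos (by norm_num)] at hv; omega
      have ho : oddsOf ((k, v) :: rest) = oddsOf rest := by
        simp [oddsOf, hv']
      have hstep : ∀ odd, solveLoopA ((k, v) :: rest) res odd
          = solveLoopA rest (res ++ List.replicate (PySem.Int.floordiv v 2).toNat k) odd := by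
        intro odd
        simp only [solveLoopA]
        rw [if_pos hv]
      refine ⟨?_, ?_⟩
      · rw [hstep, (ih _).1, ho, hh]
        split_ifs
        · rfl
        · simp [List.append_assoc]
      · intro c
        rw [hstep, (ih _).2 c, ho, hh]
        split_ifs
        · rfl
        · simp [List.append_assoc]
    · have hv' : v % 2 = 1 := by
        rw [PySem.Int.mod_eq_emod_of_pos (by norm_num)] at hv; omega
      have ho : oddsOf ((k, v) :: rest) = k :: oddsOf rest := by
        simp [oddsOf, hv']
      have hstep0 : solveLoopA ((k, v) :: rest) res []
          = solveLoopA rest (res ++ List.replicate (PySem.Int.floordiv v 2).toNat k) [k] := by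
        simp only [solveLoopA]
        rw [if_neg hv, if_neg (by simp), floordiv_pred_of_odd v hv]
      have hstep1 : ∀ c : Char, solveLoopA ((k, v) :: rest) res [c] = "NO SOLUTION" := by
        intro c
        simp only [solveLoopA]
        rw [if_neg hv, if_pos (by simp)]
      refine ⟨?_, ?_⟩
      · rw [hstep0, (ih _).2 k, ho, hh]
        by_cases h1 : 1 ≤ (oddsOf rest).length
        · rw [if_pos h1, if_pos (by simp only [List.length_cons]; omega)]
        · rw [if_neg h1, if_neg (by simp only [List.length_cons]; omega)]
          simp [List.append_assoc]
      · intro c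
        rw [hstep1 c, ho, if_pos (by simp only [List.length_cons]; omega)]

-- skipping already-seen elements: folding Set.add over t ignores copies of c once c is in s
lemma foldl_add_filter (c : Char) (t : List Char) (s : PySem.Set Char) (hc : c ∈ s) :
    t.foldl PySem.Set.add s = (t.filter (fun x => x ≠ c)).foldl PySem.Set.add s := by
  induction t generalizing s with
  | nil => rfl
  | cons x t ih =>
    by_cases hx : x = c
    · subst hx
      have : PySem.Set.add s x = s := by
        simp [PySem.Set.add, PySem.Set.contains, hc]
      simp [List.filter, this, ih s hc]
    · have hmem : c ∈ PySem.Set.add s x := by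
        simp [PySem.Set.add]; split <;> simp [hc]
      simp [List.filter, hx, ih (PySem.Set.add s x) hmem]

-- a pinned first element passes unchanged through Set.add folds that never re-add it
lemma foldl_add_cons (c : Char) (u : List Char) (s : PySem.Set Char) (hc : c ∉ u) :
    u.foldl PySem.Set.add (c :: s) = c :: u.foldl PySem.Set.add s := by
  induction u generalizing s with
  | nil => rfl
  | cons x u ih =>
    have hxc : x ≠ c := fun h => hc (h ▸ List.mem_cons_self)
    have hcu : c ∉ u := fun h => hc (List.mem_cons_of_mem _ h)
    have hcont : PySem.Set.contains (c :: s) x = PySem.Set.contains s x := by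
      simp [PySem.Set.contains, hxc]
    simp only [List.foldl_cons, PySem.Set.add, hcont]
    by_cases h : PySem.Set.contains s x = true
    · simp only [h, if_true]; exact ih s hcu
    · simp only [h, List.cons_append]; exact ih (s ++ [x]) hcu

lemma ofList_cons_filter (c : Char) (t : List Char) :
    PySem.Set.ofList (c :: t) = c :: PySem.Set.ofList (t.filter (fun x => x ≠ c)) := by
  rw [PySem.Set.ofList_eq_foldl, PySem.Set.ofList_eq_foldl]
  show t.foldl PySem.Set.add (PySem.Set.add [] c) = _
  have hadd : PySem.Set.add ([] : PySem.Set Char) c = [c] := rfl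
  rw [hadd, foldl_add_filter c t [c] (by simp),
      foldl_add_cons c _ [] (by simp)]

lemma itemsSpec_cons (c : Char) (t : List Char) :
    itemsSpec (c :: t)
      = (c, (((c :: t).count c : Nat) : Int)) :: itemsSpec (t.filter (fun x => x ≠ c)) := by
  unfold itemsSpec
  rw [ofList_cons_filter, List.map_cons]
  congr 1
  refine List.map_congr_left ?_
  intro k hk
  have hkt : k ∈ t.filter (fun x => x ≠ c) := (PySem.Set.mem_ofList _ k).1 hk
  have hkc : k ≠ c := by
    have := List.of_mem_filter hkt
    simpa using this
  have h1 : (c :: t).count k = t.count k := by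
    rw [List.count_cons]
    simp [Ne.symm hkc]
  have h2 : (t.filter (fun x => x ≠ c)).count k = t.count k :=
    List.count_filter (by simp [hkc])
  rw [h1, ← h2]

-- B's loop characterised against itemsSpec
lemma loopB_char (n : Nat) : ∀ (l : List Char), l.length ≤ n →
    ∀ (halves : List (List Char)) (odds : List Char),
    solveLoopB l halves odds
      = (halves ++ halvesOf (itemsSpec l), odds ++ oddsOf (itemsSpec l)) := by
  induction n with
  | zero =>
    intro l hl halves odds
    have : l = [] := List.eq_nil_of_length_eq_zero (Nat.le_zero.mp hl)
    subst this
    rw [solveLoopB]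
    simp [itemsSpec, halvesOf, oddsOf, PySem.Set.ofList]
  | succ n ih =>
    intro l hl halves odds
    match l with
    | [] =>
      rw [solveLoopB]
      simp [itemsSpec, halvesOf, oddsOf, PySem.Set.ofList]
    | c :: t =>
      have hflen : (t.filter (fun x => x ≠ c)).length ≤ n := by
        have := List.length_filter_le (fun x => x ≠ c) t
        simp only [List.length_cons] at hl
        omega
      rw [solveLoopB, ih _ hflen, itemsSpec_cons]
      have hhh : halvesOf ((c, (((c :: t).count c : Nat) : Int)) :: itemsSpec (t.filter (fun x => x ≠ c)))
          = List.replicate (PySem.Int.floordiv ((c :: t).count c : Int) 2).toNat c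
            :: halvesOf (itemsSpec (t.filter (fun x => x ≠ c))) := by
        simp [halvesOf]
      have hoo := oddsOf_cons (c, (((c :: t).count c : Nat) : Int))
        (itemsSpec (t.filter (fun x => x ≠ c)))
      rw [hhh, hoo]
      simp only [Prod.mk.injEq]
      constructor
      · simp [List.append_assoc]
      · split_ifs <;> simp

theorem solve_spec : Claim_equal_solve := by
  intro s _
  unfold Spec_solve solve solve_alt
  dsimp only
  rw [← PySem.Dict.counter_eq_foldl, PySem.Dict.items_counter]
  have hA := (loopA_char ((PySem.Set.ofList s.toList).map
      (fun k => (k, ((s.toList.count k : Nat) : Int)))) []).1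
  have hB := loopB_char s.toList.length s.toList le_rfl [] []
  have hitems : itemsSpec s.toList
      = (PySem.Set.ofList s.toList).map (fun k => (k, ((s.toList.count k : Nat) : Int))) := rfl
  rw [hitems] at hB
  rw [hA, hB]
  simp only [List.nil_append]
  set items := (PySem.Set.ofList s.toList).map
      (fun k => (k, ((s.toList.count k : Nat) : Int))) with hi
  by_cases h2 : 2 ≤ (oddsOf items).length
  · rw [if_pos h2, if_pos (by simpa using h2)]
  · rw [if_neg h2, if_neg (by simpa using h2)]
    have : (oddsOf items) = [] ∨ ∃ c, oddsOf items = [c] := by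
      match ho : oddsOf items with
      | [] => exact Or.inl rfl
      | [c] => exact Or.inr ⟨c, rfl⟩
      | c :: d :: r => rw [ho] at h2; simp at h2
    rcases this with h | ⟨c, h⟩
    · rw [h]
    · rw [h]
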